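-- pv_equiv track=rewrite | github.com/dmi3ev1987/CodeWars | 6-kyu/a-rule-of-divisibility-by-13/brute_force_a-rule-of-divisibility-by-13.py | thirt
-- ===== SOURCE A (Python) =====
-- def thirt(input_number):
--     pattern = [1, 10, 9, 12, 3, 4]
--     str_number = str(input_number)[::-1]
--     result = 0
--     pattern_index = 0
--     for number in str_number:
--         result += int(number) * pattern[pattern_index]
--         pattern_index += 1
--         if pattern_index == len(pattern):
--             pattern_index = 0
--     if input_number != result:
--         return thirt(result)
--     return result
-- ===== SOURCE B (Python) =====
-- def thirt(input_number):
--     n = input_number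
--     while True:
--         s, w, m = 0, 1, n
--         while m > 0:
--             m, d = divmod(m, 10)
--             s += d * w
--             w = w * 10 % 13
--         if s == n:
--             return s
--         n = s
-- ===== Notes on version B (the rewrite author's own statement) =====
-- stated objective: alternative
-- what changed: Replaces string conversion and the pattern table by pure integer arithmetic: digits are extracted with divmod(n, 10) and the cyclic weight is maintained as w = w*10 % 13 (powers of 10 mod 13), and the tail recursion becomes an explicit while loop.
import Mathlib
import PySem

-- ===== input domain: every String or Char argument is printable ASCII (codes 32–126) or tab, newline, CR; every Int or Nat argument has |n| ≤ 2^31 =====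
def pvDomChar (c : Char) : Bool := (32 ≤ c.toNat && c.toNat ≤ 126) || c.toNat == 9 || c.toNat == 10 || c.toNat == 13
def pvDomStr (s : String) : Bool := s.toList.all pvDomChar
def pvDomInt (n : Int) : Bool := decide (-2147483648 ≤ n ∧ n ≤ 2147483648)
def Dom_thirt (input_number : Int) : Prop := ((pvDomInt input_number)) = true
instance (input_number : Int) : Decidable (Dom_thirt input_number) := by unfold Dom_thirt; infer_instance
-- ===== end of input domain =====

-- B replaces A's string/pattern-table pass by pure integer arithmetic — digits via divmod(n,10),
-- cyclic weight maintained as w = w*10 % 13 — and A's tail recursion by an explicit while loop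
-- (objective: alternative). Both outer loops are totalised by the same fuel bound, which only
-- makes the shared fixed-point iteration total.

-- ===== PORT A =====
-- one pass of A's for-loop: str(input_number)[::-1], accumulator + cycling pattern_index.
-- int(number) on a single digit char: PySem.Int.ofChars? [c]; the '.getD 0' is only reached
-- where Python's int() raises (the '-' sign of a negative number), which Pre_ excludes.
def thirtStepA (m : Int) : Int :=
  let pattern : List Int := [1, 10, 9, 12, 3, 4]
  let str_number := (PySem.Int.toChars m).reverse   -- str(m)[::-1], exact
  (str_number.foldl
    (fun (st : Int × Nat) number =>
      (st.1 + ((PySem.Int.ofChars? [number]).getD 0) * (pattern.getD st.2 0),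
       if st.2 + 1 = pattern.length then 0 else st.2 + 1))
    (0, 0)).1

-- A's recursion 'if input_number != result: return thirt(result)', made total by fuel
def thirtA : Nat → Int → Int
  | 0, _ => 0
  | fuel + 1, input_number =>
    let result := thirtStepA input_number
    if input_number ≠ result then thirtA fuel result else result

def thirt (input_number : Int) : Int := thirtA 100 input_number

-- ===== PORT B =====
-- Source B's inner 'while m > 0: m, d = divmod(m, 10); s += d * w; w = w * 10 % 13',
-- totalised by fuel m.toNat + 1 (the loop halves m's digit count, so this fuel always suffices)
def thirtInnerB : Nat → Int → Int → Int → Int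
  | 0, _, s, _ => s
  | f + 1, m, s, w =>
    if 0 < m then
      thirtInnerB f (PySem.Int.floordiv m 10) (s + PySem.Int.mod m 10 * w) (PySem.Int.mod (w * 10) 13)
    else s

-- Source B's outer 'while True' loop, made total by the same fuel bound as A's recursion
def thirtLoopB : Nat → Int → Int
  | 0, _ => 0
  | fuel + 1, n =>
    let s := thirtInnerB (n.toNat + 1) n 0 1
    if s = n then s else thirtLoopB fuel s

def thirt_alt (input_number : Int) : Int := thirtLoopB 100 input_number

-- ===== PRECONDITION & SPEC =====
-- Pre_ excludes negative inputs: there str(n)[::-1] ends with '-' and Python A raises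
-- ValueError at int('-').
def Pre_thirt (input_number : Int) : Prop := 0 ≤ input_number
instance (input_number : Int) : Decidable (Pre_thirt input_number) := by unfold Pre_thirt; infer_instance
def pvWitness_thirt : Int := 1234567

def Spec_thirt (input_number : Int) (out : Int) : Prop := out = thirt_alt input_number
instance (input_number : Int) (out : Int) : Decidable (Spec_thirt input_number out) := by unfold Spec_thirt; infer_instance

-- ===== CLAIM (what is proved, stated in full; the proofs are below) =====
def Claim_equal_thirt : Prop := ∀ (input_number : Int), Dom_thirt input_number → Pre_thirt input_number → Spec_thirt input_number (thirt input_number)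

-- ===== LEMMAS AND PROOFS =====

-- the little-endian decimal digit characters of n (proof-side characterisation of str(n)[::-1])
def digitsLE (n : Nat) : List Char :=
  Nat.digitChar (n % 10) :: (if h : n / 10 = 0 then [] else digitsLE (n / 10))
decreasing_by exact Nat.div_lt_self (by omega) (by omega)

-- proof-side value of B's inner loop: weighted digit sum with the weight threaded mod 13
def bsumFull (n : Nat) (w : Int) : Int :=
  if h : n = 0 then 0
  else ((n % 10 : Nat) : Int) * w +
    (if h2 : n / 10 = 0 then 0 else bsumFull (n / 10) (PySem.Int.mod (w * 10) 13))
decreasing_by exact Nat.div_lt_self (by omega) (by omega)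

theorem toDigitsCore_eq (n : Nat) : ∀ (f : Nat) (ds : List Char), n < f →
    Nat.toDigitsCore 10 f n ds = (digitsLE n).reverse ++ ds := by
  induction n using Nat.strong_induction_on with
  | _ n ih =>
    intro f ds hf
    match f with
    | f' + 1 =>
      rw [digitsLE]
      by_cases h : n / 10 = 0
      · simp [Nat.toDigitsCore, h]
      · simp only [Nat.toDigitsCore, dif_neg h, if_neg h]
        rw [ih (n / 10) (Nat.div_lt_self (by omega) (by omega)) f' _ (by omega)]
        simp

theorem toChars_reverse (m : Int) (hm : 0 ≤ m) :
    (PySem.Int.toChars m).reverse = digitsLE m.toNat := by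
  rw [PySem.Int.toChars, if_neg (by omega), Nat.toDigits,
      toDigitsCore_eq m.toNat (m.toNat + 1) [] (by omega)]
  simp

-- common specification of one weighted-digit pass, index threaded as a Nat
def stepSpec : List Char → Nat → Int
  | [], _ => 0
  | c :: cs, j => ((PySem.Int.ofChars? [c]).getD 0) * (([1,10,9,12,3,4] : List Int).getD (j % 6) 0) + stepSpec cs (j + 1)

-- stepSpec depends on its index only modulo 6
theorem stepSpec_mod (l : List Char) (j k : Nat) (h : j % 6 = k % 6) :
    stepSpec l j = stepSpec l k := by
  induction l generalizing j k with
  | nil => rfl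
  | cons c cs ih =>
    simp only [stepSpec, h]
    rw [ih (j + 1) (k + 1) (by omega)]

theorem foldA_eq_stepSpec (l : List Char) (acc : Int) (j : Nat) (hj : j < 6) :
    (l.foldl
      (fun (st : Int × Nat) number =>
        (st.1 + ((PySem.Int.ofChars? [number]).getD 0) * (([1,10,9,12,3,4] : List Int).getD st.2 0),
         if st.2 + 1 = 6 then 0 else st.2 + 1))
      (acc, j)).1 = acc + stepSpec l j := by
  induction l generalizing acc j with
  | nil => simp [stepSpec]
  | cons c cs ih =>
    simp only [List.foldl, stepSpec]
    have hmod : j % 6 = j := Nat.mod_eq_of_lt hj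
    by_cases h : j + 1 = 6
    · rw [if_pos h, ih _ 0 (by omega), stepSpec_mod cs (j + 1) 0 (by omega), hmod]; ring
    · rw [if_neg h, ih _ (j + 1) (by omega), hmod]; ring

theorem ofChars_digitChar (d : Nat) (h : d < 10) :
    (PySem.Int.ofChars? [Nat.digitChar d]).getD 0 = (d : Int) := by
  interval_cases d <;> decide

theorem patCycle (j : Nat) :
    ([1,10,9,12,3,4] : List Int).getD ((j + 1) % 6) 0 =
      PySem.Int.mod ((([1,10,9,12,3,4] : List Int).getD (j % 6) 0) * 10) 13 := by
  have e : (j + 1) % 6 = (j % 6 + 1) % 6 := by omega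
  rw [e]
  have h : j % 6 = 0 ∨ j % 6 = 1 ∨ j % 6 = 2 ∨ j % 6 = 3 ∨ j % 6 = 4 ∨ j % 6 = 5 := by omega
  rcases h with h|h|h|h|h|h <;> rw [h] <;> decide

-- A's weighted pass over the digit characters equals the arithmetic digit sum
theorem stepSpec_eq_bsum (n : Nat) : ∀ (j : Nat),
    stepSpec (digitsLE n) j = bsumFull n (([1,10,9,12,3,4] : List Int).getD (j % 6) 0) := by
  induction n using Nat.strong_induction_on with
  | _ n ih =>
    intro j
    by_cases h0 : n = 0
    · subst h0
      rw [show digitsLE 0 = [Nat.digitChar 0] from by rw [digitsLE]; simp,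
          show bsumFull 0 (([1,10,9,12,3,4] : List Int).getD (j % 6) 0) = 0 from by
            rw [bsumFull]; simp]
      simp [stepSpec, ofChars_digitChar 0 (by omega)]
    · conv_lhs => rw [digitsLE]
      conv_rhs => rw [bsumFull]
      rw [dif_neg h0]
      by_cases h : n / 10 = 0
      · rw [dif_pos h, dif_pos h]
        simp only [stepSpec, ofChars_digitChar (n % 10) (by omega)]
      · rw [dif_neg h, dif_neg h]
        simp only [stepSpec, ofChars_digitChar (n % 10) (by omega)]
        rw [ih (n / 10) (Nat.div_lt_self (by omega) (by omega)) (j + 1), patCycle]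

-- B's inner loop computes the same arithmetic digit sum (with enough fuel)
theorem innerB_spec : ∀ (f : Nat) (n : Nat) (s w : Int), n < f →
    thirtInnerB f (n : Int) s w = s + bsumFull n w := by
  intro f
  induction f with
  | zero => intro n s w h; exact absurd h (Nat.not_lt_zero n)
  | succ f ih =>
    intro n s w h
    by_cases h0 : n = 0
    · subst h0
      rw [thirtInnerB, if_neg (by omega), bsumFull]
      simp
    · rw [thirtInnerB, if_pos (by exact_mod_cast Nat.pos_of_ne_zero h0)]
      have hd : PySem.Int.floordiv (n : Int) 10 = ((n / 10 : Nat) : Int) := by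
        exact_mod_cast PySem.Int.floordiv_natCast n 10
      have hm2 : PySem.Int.mod (n : Int) 10 = ((n % 10 : Nat) : Int) := by
        exact_mod_cast PySem.Int.mod_natCast n 10
      rw [hd, hm2, ih (n / 10) _ _ (by omega)]
      conv_rhs => rw [bsumFull]
      rw [dif_neg h0]
      by_cases h2 : n / 10 = 0
      · rw [dif_pos h2, h2]
        rw [show bsumFull 0 (PySem.Int.mod (w * 10) 13) = 0 from by rw [bsumFull]; simp]
        ring
      · rw [dif_neg h2]; ring

-- the two single-pass step functions agree on nonnegative inputs
theorem step_eq (m : Int) (hm : 0 ≤ m) :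
    thirtStepA m = thirtInnerB (m.toNat + 1) m 0 1 := by
  obtain ⟨t, rfl⟩ : ∃ t : Nat, m = (t : Int) := ⟨m.toNat, (Int.toNat_of_nonneg hm).symm⟩
  rw [thirtStepA]
  simp only [Int.toNat_natCast, show ([1,10,9,12,3,4] : List Int).length = 6 from rfl]
  rw [foldA_eq_stepSpec _ 0 0 (by omega), toChars_reverse _ (by positivity)]
  simp only [Int.toNat_natCast]
  rw [stepSpec_eq_bsum t 0, innerB_spec (t + 1) t 0 1 (by omega)]
  norm_num

-- B's step value is nonnegative, so the iteration stays in the proved region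
theorem bsum_nonneg (n : Nat) : ∀ (w : Int), 0 ≤ w → 0 ≤ bsumFull n w := by
  induction n using Nat.strong_induction_on with
  | _ n ih =>
    intro w hw
    rw [bsumFull]
    by_cases h0 : n = 0
    · simp [h0]
    · rw [dif_neg h0]
      have h1 : (0 : Int) ≤ ((n % 10 : Nat) : Int) * w := mul_nonneg (by positivity) hw
      by_cases h2 : n / 10 = 0
      · rw [dif_pos h2]; omega
      · rw [dif_neg h2]
        have := ih (n / 10) (Nat.div_lt_self (by omega) (by omega))
          (PySem.Int.mod (w * 10) 13) (PySem.Int.mod_nonneg _ (by omega))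
        omega

-- the two fuelled outer loops agree step for step on nonnegative inputs
theorem loop_eq (fuel : Nat) : ∀ (n : Int), 0 ≤ n → thirtA fuel n = thirtLoopB fuel n := by
  induction fuel with
  | zero => intro n _; rfl
  | succ fuel ih =>
    intro n hn
    simp only [thirtA, thirtLoopB, ne_eq, ite_not]
    rw [← step_eq n hn]
    have hres : 0 ≤ thirtStepA n := by
      obtain ⟨t, ht⟩ : ∃ t : Nat, n = (t : Int) := ⟨n.toNat, (Int.toNat_of_nonneg hn).symm⟩
      subst ht
      rw [step_eq _ (by positivity)]
      simp only [Int.toNat_natCast]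
      rw [innerB_spec (t + 1) t 0 1 (by omega)]
      have := bsum_nonneg t 1 (by omega)
      omega
    by_cases h : thirtStepA n = n
    · rw [if_pos h, if_pos (by omega)]
    · rw [if_neg h, if_neg (by omega), ih _ hres]

-- ===== VERDICT (by name: the statement is the Claim_ definition above) =====
theorem thirt_spec : Claim_equal_thirt := by
  intro n _ hn
  unfold Spec_thirt thirt thirt_alt
  exact loop_eq 100 n hn
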